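-- pv_equiv track=rewrite | github.com/Lucas-Guimaraes/Reddit-Daily-Programmer | Easy Problems/201-210/208easy.py | cull_lst
-- ===== SOURCE A (Python) =====
-- def cull_lst(i):
--     # Splits string + makes them integers for sorting
--     i = i.split()
--     i = [int(x) for x in i]
--     # eliminates to set, sorts the set.
--     i = set(i)
--     i = sorted(i)
--
--     # turns to string, join string
--     i = [str(x) for x in i]
--     i = " ".join(i)
--
--     return i
-- ===== SOURCE B (Python) =====
-- def _ins(acc, x):
--     # insert x into the sorted duplicate-free list acc, keeping it sorted and duplicate-free
--     if not acc:
--         return [x]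
--     if x < acc[0]:
--         return [x] + acc
--     if x == acc[0]:
--         return acc
--     return [acc[0]] + _ins(acc[1:], x)
--
-- def cull_lst(i):
--     acc = []
--     for tok in i.split():
--         acc = _ins(acc, int(tok))
--     return " ".join(str(v) for v in acc)
-- ===== Notes on version B (the rewrite author's own statement) =====
-- stated objective: alternative
-- what changed: B never calls sorted() and builds no set: it scans the tokens once and inserts each parsed int into its place in a sorted duplicate-free accumulator via a recursive ordered-insertion helper (skipping values already present), producing the sorted unique list incrementally.
import Mathlib
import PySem

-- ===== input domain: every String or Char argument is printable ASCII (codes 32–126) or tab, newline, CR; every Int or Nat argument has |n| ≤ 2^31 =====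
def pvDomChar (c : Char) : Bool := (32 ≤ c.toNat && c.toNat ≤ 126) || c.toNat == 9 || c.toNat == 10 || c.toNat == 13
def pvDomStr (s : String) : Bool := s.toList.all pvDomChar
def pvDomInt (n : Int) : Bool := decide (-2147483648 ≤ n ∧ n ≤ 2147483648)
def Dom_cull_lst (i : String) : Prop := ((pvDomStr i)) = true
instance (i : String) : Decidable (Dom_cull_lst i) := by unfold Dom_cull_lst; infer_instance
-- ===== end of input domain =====

-- B builds the sorted unique list incrementally by ordered insertion of each parsed token
-- (no sorted() call, no set); objective: alternative algorithm, same result.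


-- ===== PORT A =====
-- int(x): total form of PySem.Int.ofStr?; exact under Pre_cull_lst (every token parses).
def pvParse (t : String) : Int := (PySem.Int.ofStr? t).getD 0

def cull_lst (i : String) : String :=
  let toks := PySem.Str.split₀ i
  let ints := toks.map pvParse
  let s := PySem.Set.ofList ints
  let srt := PySem.List.sorted s (fun x => x) false
  let strs := srt.map PySem.Int.toStr
  PySem.Str.join " " strs

-- ===== PORT B =====
-- _ins of Source B: ordered insertion into a sorted duplicate-free list
def pvIns : List Int → Int → List Int
  | [], x => [x]
  | a :: t, x => if x < a then x :: a :: t else if x = a then a :: t else a :: pvIns t x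

def cull_lst_alt (i : String) : String :=
  let acc := (PySem.Str.split₀ i).foldl (fun acc tok => pvIns acc (pvParse tok)) []
  PySem.Str.join " " (acc.map PySem.Int.toStr)

-- ===== PRECONDITION & SPEC =====
-- Pre_: every whitespace-separated token of i is an int literal — optional sign, digits,
-- single '_' only between digits (else A's int() raises ValueError). Stated as a one-pass
-- character state machine: 0 = at token boundary, 1 = after a sign, 2 = inside digits, 3 = just after '_'.
def pvWs (c : Char) : Bool := c = ' ' || c = '\t' || c = '\n' || c = '\r' || c = '\x0b' || c = '\x0c'
def pvScan : List Char → Nat → Bool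
  | [], st => st == 0 || st == 2
  | c :: cs, 0 => if pvWs c then pvScan cs 0 else if c = '+' || c = '-' then pvScan cs 1 else (c.isDigit && pvScan cs 2)
  | c :: cs, 1 => c.isDigit && pvScan cs 2
  | c :: cs, 2 => if pvWs c then pvScan cs 0 else if c.isDigit then pvScan cs 2 else if c = '_' then pvScan cs 3 else false
  | c :: cs, _ => c.isDigit && pvScan cs 2
def Pre_cull_lst (i : String) : Prop := pvScan i.toList 0 = true
instance (i : String) : Decidable (Pre_cull_lst i) := by unfold Pre_cull_lst; infer_instance
def pvWitness_cull_lst : String := "3 1 2 1"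
def Spec_cull_lst (i : String) (out : String) : Prop := out = cull_lst_alt i
instance (i : String) (out : String) : Decidable (Spec_cull_lst i out) := by unfold Spec_cull_lst; infer_instance

-- ===== CLAIM (what is proved, stated in full; the proofs are below) =====
def Claim_equal_cull_lst : Prop := ∀ (i : String), Dom_cull_lst i → Pre_cull_lst i → Spec_cull_lst i (cull_lst i)

-- ===== LEMMAS AND PROOFS =====

theorem mem_pvIns (acc : List Int) (x z : Int) : z ∈ pvIns acc x ↔ z = x ∨ z ∈ acc := by
  induction acc with
  | nil => simp [pvIns]
  | cons a t ih =>
    simp only [pvIns]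
    split_ifs with h1 h2
    · simp
    · subst h2; simp [List.mem_cons]
    · simp [List.mem_cons, ih]; tauto

theorem pairwise_pvIns (acc : List Int) (x : Int) (h : acc.Pairwise (· < ·)) :
    (pvIns acc x).Pairwise (· < ·) := by
  induction acc with
  | nil => simp [pvIns]
  | cons a t ih =>
    rcases List.pairwise_cons.1 h with ⟨ha, ht⟩
    simp only [pvIns]
    split_ifs with h1 h2
    · exact List.pairwise_cons.2 ⟨by
        intro z hz
        rcases List.mem_cons.1 hz with rfl | hzt
        · exact h1
        · exact lt_trans h1 (ha z hzt), h⟩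
    · exact h
    · refine List.pairwise_cons.2 ⟨?_, ih ht⟩
      intro z hz
      rcases (mem_pvIns t x z).1 hz with rfl | hzt
      · omega
      · exact ha z hzt

theorem mem_foldl_pvIns (l : List Int) (acc : List Int) (z : Int) :
    z ∈ l.foldl pvIns acc ↔ z ∈ acc ∨ z ∈ l := by
  induction l generalizing acc with
  | nil => simp
  | cons x t ih => simp [List.foldl_cons, ih, mem_pvIns]; tauto

theorem pairwise_foldl_pvIns (l : List Int) (acc : List Int) (h : acc.Pairwise (· < ·)) :
    (l.foldl pvIns acc).Pairwise (· < ·) := by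
  induction l generalizing acc with
  | nil => exact h
  | cons x t ih => exact ih _ (pairwise_pvIns acc x h)

theorem foldl_pvIns_eq_sorted_set (xs : List Int) :
    PySem.List.sorted (PySem.Set.ofList xs) (fun x => x) false = xs.foldl pvIns [] := by
  have hpw : (xs.foldl pvIns []).Pairwise (· < ·) :=
    pairwise_foldl_pvIns xs [] (by simp)
  apply PySem.List.sorted_eq_of_perm_of_pairwise_lt
  · have hnd1 : (xs.foldl pvIns []).Nodup := hpw.imp (fun h => ne_of_lt h)
    rw [List.perm_ext_iff_of_nodup hnd1 (PySem.Set.nodup_ofList xs)]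
    intro z
    rw [mem_foldl_pvIns, PySem.Set.mem_ofList]
    simp
  · simpa using hpw

-- ===== VERDICT (by name: the statement is the Claim_ definition above) =====
theorem cull_lst_spec : Claim_equal_cull_lst := by
  intro i _ _
  unfold Spec_cull_lst
  simp only [cull_lst, cull_lst_alt]
  rw [foldl_pvIns_eq_sorted_set, List.foldl_map]
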